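-- pv_equiv track=rewrite | github.com/imahero1492/MMArchiveCLI | MMArchiveCLI.py | most_repeated_frame
-- ===== SOURCE A (Python) =====
-- def most_repeated_frame(frames):
--     """Find the index of the most repeated frame"""
--     frame_counts = {}
--     for i, frame in enumerate(frames):
--         frame_name = frame if isinstance(frame, str) else str(frame)
--         if frame_name in frame_counts:
--             frame_counts[frame_name].append(i)
--         else:
--             frame_counts[frame_name] = [i]
--
--     max_count = 0
--     most_repeated = 0
--     for frame_name, indices in frame_counts.items():
--         if len(indices) > max_count:
--             max_count = len(indices)
--             most_repeated = indices[0]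
--
--     return most_repeated
-- ===== SOURCE B (Python) =====
-- def most_repeated_frame(frames):
--     """Find the index of the most repeated frame"""
--     names = [f if isinstance(f, str) else str(f) for f in frames]
--     if not names:
--         return 0
--     tally = {}
--     for n in names:
--         tally[n] = tally.get(n, 0) + 1
--     counts = [tally[n] for n in names]
--     return counts.index(max(counts))
-- ===== Notes on version B (the rewrite author's own statement) =====
-- stated objective: simpler
-- what changed: B drops A's dict of index lists and its strict-max scan over dict items: it tallies occurrence counts per name, maps them back onto the positions, and returns the first position whose count equals the maximum, which reproduces A's earliest-first-occurrence tie-break.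
import Mathlib
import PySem

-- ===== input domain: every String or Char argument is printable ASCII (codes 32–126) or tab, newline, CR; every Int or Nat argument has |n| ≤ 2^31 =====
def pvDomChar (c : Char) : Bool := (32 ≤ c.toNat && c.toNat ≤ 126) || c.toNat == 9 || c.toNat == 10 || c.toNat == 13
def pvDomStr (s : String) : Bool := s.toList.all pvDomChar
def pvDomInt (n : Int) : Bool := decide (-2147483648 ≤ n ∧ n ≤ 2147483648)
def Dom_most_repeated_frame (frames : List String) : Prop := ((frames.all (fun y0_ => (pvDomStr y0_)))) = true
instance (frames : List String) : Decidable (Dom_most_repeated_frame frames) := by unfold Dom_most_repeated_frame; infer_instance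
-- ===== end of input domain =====

-- B replaces A's dict-of-index-lists plus strict-max scan over the dict items by a per-position
-- count list, its max, and the first position attaining it (objective: simpler; same result,
-- including the earliest-first-occurrence tie-break and the empty-list -> 0 case).


-- ===== PORT A =====
-- literal port of A: group the indices of each frame name in an insertion-ordered dict
-- (frame_name = frame: every element of `List String` is a str, so the isinstance branch is constant),
-- then scan the dict items keeping the first strictly greater count.
-- Python's `indices[0]` is ported as pyGetD _ 0 0: it is only evaluated on a stored indices list,
-- which is always nonempty, and there pyGetD _ 0 is exact.
def most_repeated_frame (frames : List String) : Int :=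
  let frame_counts : PySem.Dict String (List Int) :=
    (PySem.List.enumerate frames).foldl
      (fun d p =>
        let frame_name := p.2
        if d.contains frame_name then d.modify frame_name [] (· ++ [p.1])
        else d.insert frame_name [p.1])
      PySem.Dict.empty
  let r : Int × Int :=
    frame_counts.items.foldl
      (fun s q =>
        if ((q.2.length : Int)) > s.1 then ((q.2.length : Int), PySem.List.pyGetD q.2 0 0)
        else s)
      (0, 0)
  r.2

-- ===== PORT B =====
-- port of Source B: names = frames (the isinstance conversion is the identity on List String);
-- tally = occurrence counts per name; counts = per-position counts; answer = first index of
-- max(counts). `tally[n]` is ported as getD n 0: every n ∈ names is a key of tally, so it is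
-- exact there. max? and index? are `some` on the nonempty counts list (the max is a member),
-- so the two 0 fallbacks are unreachable totality guards, not behaviour.
def most_repeated_frame_alt (frames : List String) : Int :=
  let names := frames
  if names = [] then 0
  else
    let tally : PySem.Dict String Int :=
      names.foldl (fun d n => d.insert n (d.getD n 0 + 1)) PySem.Dict.empty
    let counts : List Int := names.map (fun n => tally.getD n 0)
    match PySem.List.max? counts (fun x => x) with
    | none => 0
    | some m =>
      match PySem.List.index? counts m with
      | none => 0
      | some k => (k : Int)

-- ===== PRECONDITION & SPEC =====
def Spec_most_repeated_frame (frames : List String) (out : Int) : Prop := out = most_repeated_frame_alt frames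
instance (frames : List String) (out : Int) : Decidable (Spec_most_repeated_frame frames out) := by unfold Spec_most_repeated_frame; infer_instance

-- ===== CLAIM (what is proved, stated in full; the proofs are below) =====
def Claim_equal_most_repeated_frame : Prop := ∀ (frames : List String), Dom_most_repeated_frame frames → Spec_most_repeated_frame frames (most_repeated_frame frames)

-- ===== LEMMAS AND PROOFS =====

-- the list of indices at which s occurs in frames, in order
def pvIdxs (frames : List String) (s : String) : List Int :=
  ((PySem.List.enumerate frames).filter (fun p => p.2 == s)).map (fun p => p.1)

-- the step function of A's grouping loop IS Dict.modify
theorem pvStepEq (d : PySem.Dict String (List Int)) (p : Int × String) :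
    (if d.contains p.2 then d.modify p.2 [] (· ++ [p.1]) else d.insert p.2 [p.1])
      = d.modify p.2 [] (· ++ [p.1]) := by
  by_cases h : d.contains p.2
  · simp [h]
  · rw [if_neg h, PySem.Dict.modify,
      PySem.Dict.getD_of_not_contains d ([] : List Int) (by simpa using h)]
    rfl

theorem pvKeys (frames : List String) :
    ((PySem.List.enumerate frames).foldl (fun d p => d.modify p.2 [] (· ++ [p.1]))
      (PySem.Dict.empty : PySem.Dict String (List Int))).keys = PySem.Set.ofList frames := by
  have h := PySem.Dict.keys_foldl_modify_key (l := PySem.List.enumerate frames)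
    (key := fun p => p.2) (d0 := ([] : List Int))
    (f := fun (_ : PySem.Dict String (List Int)) (p : Int × String) (l : List Int) => l ++ [p.1])
    (d := PySem.Dict.empty)
  simpa [PySem.List.map_snd_enumerate, PySem.Set.ofList_eq_foldl, PySem.Set.update,
    PySem.Dict.keys_empty] using h

theorem pvNodupKeys (frames : List String) :
    ((PySem.List.enumerate frames).foldl (fun d p => d.modify p.2 [] (· ++ [p.1]))
      (PySem.Dict.empty : PySem.Dict String (List Int))).keys.Nodup := by
  have h := PySem.Dict.nodup_keys_foldl_modify_key (l := PySem.List.enumerate frames)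
    (key := fun p => p.2) (d0 := ([] : List Int))
    (f := fun (_ : PySem.Dict String (List Int)) (p : Int × String) (l : List Int) => l ++ [p.1])
    (d := PySem.Dict.empty) (by simp [PySem.Dict.keys_empty])
  simpa using h

theorem pvGetD (frames : List String) (s : String) :
    ((PySem.List.enumerate frames).foldl (fun d p => d.modify p.2 [] (· ++ [p.1]))
      (PySem.Dict.empty : PySem.Dict String (List Int))).getD s [] = pvIdxs frames s := by
  have h := PySem.Dict.getD_foldl_modify_append
    ((PySem.List.enumerate frames).map (fun p => (p.2, p.1)))
    (PySem.Dict.empty : PySem.Dict String (List Int)) s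
  rw [List.foldl_map] at h
  simpa [pvIdxs, List.filter_map, List.map_map, Function.comp] using h

-- pvIdxs has length = count
theorem pvIdxsLen (frames : List String) (s : String) :
    (pvIdxs frames s).length = frames.count s := by
  have h := List.countP_map (p := fun x => x == s)
    (f := fun p : Int × String => p.2) (l := PySem.List.enumerate frames)
  rw [PySem.List.map_snd_enumerate] at h
  simp only [pvIdxs, List.length_map, ← List.countP_eq_length_filter, List.count_eq_countP]
  exact h.symm

-- the first element of pvIdxs is the index of the first occurrence
theorem pvIdxsHeadAux (xs : List String) (s : String) (h : s ∈ xs) : ∀ (n : Int),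
    ∃ rest, (PySem.List.enumerate xs n).filter (fun p => p.2 == s)
      = (n + (xs.idxOf s : Int), s) :: rest := by
  induction xs with
  | nil => cases h
  | cons x t ih =>
    intro n
    by_cases hx : x = s
    · subst hx
      refine ⟨(PySem.List.enumerate t (n+1)).filter (fun p => p.2 == x), ?_⟩
      simp [PySem.List.enumerate_cons, List.idxOf_cons_self]
    · have hs : s ∈ t := by
        rcases List.mem_cons.mp h with h1 | h1
        · exact absurd h1.symm hx
        · exact h1
      obtain ⟨rest, hr⟩ := ih hs (n + 1)
      refine ⟨rest, ?_⟩
      rw [PySem.List.enumerate_cons]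
      rw [List.filter_cons_of_neg (by simpa using hx)]
      rw [hr]
      have : ((x :: t).idxOf s : Int) = (t.idxOf s : Int) + 1 := by
        rw [List.idxOf_cons_ne _ (by exact hx)]
        push_cast; ring
      rw [this]
      congr 2
      ring

theorem pvIdxsHead (frames : List String) (s : String) (h : s ∈ frames) :
    PySem.List.pyGetD (pvIdxs frames s) 0 0 = (frames.idxOf s : Int) := by
  obtain ⟨rest, hr⟩ := pvIdxsHeadAux frames s h 0
  simp only [pvIdxs, hr, zero_add, List.map_cons]
  rw [PySem.List.pyGetD_ofNat']
  rfl

-- the strict-max selection fold ignores a list whose values never exceed the accumulator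
theorem pvSelNone {α : Type} (v out : α → Int) :
    ∀ (L : List α) (s : Int × Int), (∀ y ∈ L, v y ≤ s.1) →
      L.foldl (fun s x => if v x > s.1 then (v x, out x) else s) s = s := by
  intro L
  induction L with
  | nil => intro s _; rfl
  | cons x t ih =>
    intro s hall
    have hx : v x ≤ s.1 := hall x (by simp)
    simp only [List.foldl_cons, if_neg (by omega : ¬ v x > s.1)]
    exact ih s (fun y hy => hall y (by simp [hy]))

-- the fold returns the first element strictly exceeding everything before it and at least everything after
theorem pvSelFirst {α : Type} (v out : α → Int) (x : α) (L2 : List α) :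
    ∀ (L1 : List α) (s : Int × Int), s.1 < v x → (∀ y ∈ L1, v y < v x) →
      (∀ y ∈ L2, v y ≤ v x) →
      (L1 ++ x :: L2).foldl (fun s x => if v x > s.1 then (v x, out x) else s) s
        = (v x, out x) := by
  intro L1
  induction L1 with
  | nil =>
    intro s hs _ h2
    simp only [List.nil_append, List.foldl_cons, if_pos (by omega : v x > s.1)]
    exact pvSelNone v out L2 (v x, out x) (by simpa using h2)
  | cons y t ih =>
    intro s hs h1 h2
    have hy : v y < v x := h1 y (by simp)
    simp only [List.cons_append, List.foldl_cons]
    by_cases h : v y > s.1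
    · rw [if_pos h]
      exact ih (v y, out y) (by omega) (fun z hz => h1 z (by simp [hz])) h2
    · rw [if_neg h]
      exact ih s hs (fun z hz => h1 z (by simp [hz])) h2

-- Set.ofList lists the names in order of first occurrence
theorem pvOfListPairwise {α : Type} [BEq α] [LawfulBEq α] (xs : List α) :
    (PySem.Set.ofList xs).Pairwise (fun a b => xs.idxOf a < xs.idxOf b) := by
  induction xs using List.reverseRecOn with
  | nil => simp [PySem.Set.ofList_eq_foldl]
  | append_singleton t y ih =>
    have hof : PySem.Set.ofList (t ++ [y]) = PySem.Set.add (PySem.Set.ofList t) y := by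
      simp [PySem.Set.ofList_eq_foldl, List.foldl_append]
    by_cases hy : y ∈ PySem.Set.ofList t
    · rw [hof, PySem.Set.add, if_pos (by simpa [PySem.Set.contains] using hy)]
      refine ih.imp_of_mem ?_
      intro a b ha hb hab
      have ha' : a ∈ t := (PySem.Set.mem_ofList t a).mp ha
      have hb' : b ∈ t := (PySem.Set.mem_ofList t b).mp hb
      rwa [List.idxOf_append_of_mem ha', List.idxOf_append_of_mem hb']
    · rw [hof, PySem.Set.add, if_neg (by simpa [PySem.Set.contains] using hy)]
      rw [List.pairwise_append]
      refine ⟨ih.imp_of_mem ?_, by simp, ?_⟩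
      · intro a b ha hb hab
        have ha' : a ∈ t := (PySem.Set.mem_ofList t a).mp ha
        have hb' : b ∈ t := (PySem.Set.mem_ofList t b).mp hb
        rwa [List.idxOf_append_of_mem ha', List.idxOf_append_of_mem hb']
      · intro a ha b hb
        simp only [List.mem_singleton] at hb
        rw [hb]
        have ha' : a ∈ t := (PySem.Set.mem_ofList t a).mp ha
        have hy' : y ∉ t := fun hc => hy ((PySem.Set.mem_ofList t y).mpr hc)
        rw [List.idxOf_append_of_mem ha', List.idxOf_append_of_notMem hy']
        have := List.idxOf_lt_length_of_mem ha'
        simp [List.idxOf_cons_self]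
        omega

-- the first occurrence of l[i] is at position ≤ i
theorem pvIdxOfGetElemLe (l : List String) (i : Nat) (hi : i < l.length) : l.idxOf l[i] ≤ i := by
  induction l generalizing i with
  | nil => simp at hi
  | cons x t ih =>
    cases i with
    | zero => simp [List.idxOf_cons_self]
    | succ n =>
      by_cases hx : x = t[n]'(by simpa using hi)
      · simp [← hx, List.idxOf_cons_self]
      · rw [List.getElem_cons_succ, List.idxOf_cons_ne _ (by simpa using hx)]
        have := ih n (by simpa using hi)
        omega

theorem pvMain (frames : List String) :
    most_repeated_frame frames = most_repeated_frame_alt frames := by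
  rcases eq_or_ne frames [] with hnil | hne
  · subst hnil; rfl
  · -- B side
    rw [most_repeated_frame_alt]
    simp only [if_neg hne]
    rw [show (fun n => ((frames.foldl (fun d n => d.insert n (d.getD n 0 + 1))
          (PySem.Dict.empty : PySem.Dict String Int)).getD n 0))
        = (fun n => (PySem.List.count frames n : Int)) from
      funext fun n => by
        rw [PySem.Dict.getD_foldl_insert_add_one]
        simp [PySem.Dict.getD_empty, PySem.List.count_eq]]
    set counts : List Int := frames.map (fun n => (PySem.List.count frames n : Int)) with hcounts
    have hcne : counts ≠ [] := by simpa [hcounts] using hne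
    rcases hmo : PySem.List.max? counts (fun x => x) with _ | m
    · exact absurd ((PySem.List.max?_eq_none_iff counts _).mp hmo) hcne
    have hmmem : m ∈ counts := PySem.List.max?_mem hmo
    have hmax : ∀ v ∈ counts, v ≤ m := by
      intro v hv; exact PySem.List.max?_isMax hmo v hv
    rcases hio : PySem.List.index? counts m with _ | k
    · rw [PySem.List.index?_eq_none_iff] at hio; exact absurd hmmem hio
    obtain ⟨hk, hck, hmin⟩ := PySem.List.getElem_of_index?_eq_some hio
    have hkf : k < frames.length := by simpa [hcounts] using hk
    set s0 := frames[k] with hs0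
    have hcntk : (PySem.List.count frames s0 : Int) = m := by
      simpa [hcounts] using hck
    -- A side
    rw [most_repeated_frame]
    simp only []
    rw [show (fun (d : PySem.Dict String (List Int)) (p : Int × String) =>
          let frame_name := p.2
          if d.contains frame_name then d.modify frame_name [] (· ++ [p.1])
          else d.insert frame_name [p.1])
        = (fun d p => d.modify p.2 [] (· ++ [p.1])) from
      funext fun d => funext fun p => pvStepEq d p]
    rw [PySem.Dict.items_eq_map_keys _ (pvNodupKeys frames) []]
    rw [pvKeys frames]
    rw [show (fun s => (s, ((PySem.List.enumerate frames).foldl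
          (fun d p => d.modify p.2 [] (· ++ [p.1]))
          (PySem.Dict.empty : PySem.Dict String (List Int))).getD s []))
        = (fun s => (s, pvIdxs frames s)) from
      funext fun s => by rw [pvGetD]]
    rw [List.foldl_map]
    -- decompose the key set at s0
    have hs0f : s0 ∈ frames := List.getElem_mem hkf
    have hs0K : s0 ∈ PySem.Set.ofList frames := (PySem.Set.mem_ofList frames s0).mpr hs0f
    obtain ⟨K1, K2, hK⟩ := List.append_of_mem hs0K
    have hpw := pvOfListPairwise frames
    rw [hK] at hpw
    rw [List.pairwise_append] at hpw
    have hbefore : ∀ a ∈ K1, frames.idxOf a < frames.idxOf s0 := by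
      intro a ha; exact hpw.2.2 a ha s0 (by simp)
    -- idxOf s0 = k
    have hjk : frames.idxOf s0 = k := by
      have hle : frames.idxOf s0 ≤ k := pvIdxOfGetElemLe frames k hkf
      have hlt : frames.idxOf s0 < frames.length := Nat.lt_of_le_of_lt hle hkf
      rcases Nat.lt_or_ge (frames.idxOf s0) k with h | h
      · exfalso
        have h1 : counts[frames.idxOf s0]'(by simpa [hcounts] using hlt) ≠ m := hmin _ h
        have h2 : counts[frames.idxOf s0]'(by simpa [hcounts] using hlt)
            = (PySem.List.count frames s0 : Int) := by
          simp [hcounts, List.getElem_idxOf hlt]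
        exact h1 (h2.trans hcntk)
      · omega
    -- apply the selection-fold lemma
    rw [hK]
    have hres := pvSelFirst (fun x => ((pvIdxs frames x).length : Int))
      (fun x => PySem.List.pyGetD (pvIdxs frames x) 0 0) s0 K2 K1 (0, 0)
      (by
        simp only [pvIdxsLen]
        have : 0 < frames.count s0 := List.count_pos_iff.mpr hs0f
        exact_mod_cast this)
      (by
        intro y hy
        have hyK : y ∈ PySem.Set.ofList frames := by rw [hK]; simp [hy]
        have hyf : y ∈ frames := (PySem.Set.mem_ofList frames y).mp hyK
        simp only [pvIdxsLen]
        have hylt : frames.idxOf y < k := by rw [← hjk]; exact hbefore y hy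
        have hyl : frames.idxOf y < frames.length := List.idxOf_lt_length_of_mem hyf
        have h1 : counts[frames.idxOf y]'(by simpa [hcounts] using hyl) ≠ m := hmin _ hylt
        have h2 : counts[frames.idxOf y]'(by simpa [hcounts] using hyl)
            = (PySem.List.count frames y : Int) := by
          simp [hcounts, List.getElem_idxOf hyl]
        have h3 : (PySem.List.count frames y : Int) ≤ m := by
          rw [← h2]; exact hmax _ (List.getElem_mem _)
        have hle' : ((List.count y frames : Int)) ≤ m := by
          simpa [PySem.List.count_eq] using h3
        have hne' : ((List.count y frames : Int)) ≠ m := by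
          intro hc; apply h1; rw [h2]; simpa [PySem.List.count_eq] using hc
        have hm' : ((List.count s0 frames : Int)) = m := by
          simpa [PySem.List.count_eq] using hcntk
        omega)
      (by
        intro y hy
        have hyK : y ∈ PySem.Set.ofList frames := by rw [hK]; simp [hy]
        have hyf : y ∈ frames := (PySem.Set.mem_ofList frames y).mp hyK
        simp only [pvIdxsLen]
        have hmem' : (PySem.List.count frames y : Int) ∈ counts := by
          simp only [hcounts]; exact List.mem_map.mpr ⟨y, hyf, rfl⟩
        have hle' : ((List.count y frames : Int)) ≤ m := by
          simpa [PySem.List.count_eq] using hmax _ hmem'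
        have hm' : ((List.count s0 frames : Int)) = m := by
          simpa [PySem.List.count_eq] using hcntk
        omega)
    rw [hres, hio]
    exact (pvIdxsHead frames s0 hs0f).trans (by rw [hjk])

-- ===== VERDICT (by name: the statement is the Claim_ definition above) =====
theorem most_repeated_frame_spec : Claim_equal_most_repeated_frame := by
  intro frames _
  exact pvMain frames
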